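-- pv_equiv track=rewrite | github.com/kalelpida/hypatia | papier2/paper3.py | genere_cles
-- ===== SOURCE A (Python) =====
-- def genere_cles(campagne, rend_inutile):
--     #ordonner les clefs dans l'ordre le plus efficace pour lancer le moins d'opérations possible
--     liste=list(campagne.keys())
--     note={cle:0 for cle in liste}
--     for cle in campagne.keys():
--         for cles_simples in rend_inutile.values():
--             if cle in cles_simples:
--                 note[cle]+=1
--     liste.sort(key=lambda x: note[x])
--     return liste
-- ===== SOURCE B (Python) =====
-- def genere_cles(campagne, rend_inutile):
--     # count how many value-lists contain each key, then counting/bucket sort (stable, no comparison sort)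
--     vals = list(rend_inutile.values())
--     note = {cle: sum(cle in cs for cs in vals) for cle in campagne}
--     buckets = [[] for _ in range(max(note.values(), default=0) + 1)]
--     for cle in campagne:
--         buckets[note[cle]].append(cle)
--     return [cle for b in buckets for cle in b]
-- ===== Notes on version B (the rewrite author's own statement) =====
-- stated objective: alternative
-- what changed: Replaces the comparison sort (list.sort with a count key) by a counting/bucket sort: counts are built in a dict comprehension, keys are appended to buckets[count] in original order and the buckets are concatenated low-to-high, which reproduces the stable ascending order without any comparison sort.
import Mathlib
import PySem

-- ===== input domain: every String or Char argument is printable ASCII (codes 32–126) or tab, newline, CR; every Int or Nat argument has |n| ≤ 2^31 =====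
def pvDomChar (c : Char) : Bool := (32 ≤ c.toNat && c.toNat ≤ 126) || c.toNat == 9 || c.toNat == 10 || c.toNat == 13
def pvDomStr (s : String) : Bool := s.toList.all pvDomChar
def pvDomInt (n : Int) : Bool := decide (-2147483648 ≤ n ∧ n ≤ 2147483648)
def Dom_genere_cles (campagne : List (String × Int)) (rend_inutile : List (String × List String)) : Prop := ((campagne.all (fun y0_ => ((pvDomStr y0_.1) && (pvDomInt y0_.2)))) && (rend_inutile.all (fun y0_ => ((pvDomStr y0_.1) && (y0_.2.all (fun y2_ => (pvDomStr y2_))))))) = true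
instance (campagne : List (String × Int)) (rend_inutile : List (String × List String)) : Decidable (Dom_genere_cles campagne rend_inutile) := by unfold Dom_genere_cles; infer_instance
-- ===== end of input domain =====

-- B replaces the comparison sort (sort keyed by count) with a counting/bucket sort; same stable order, 'alternative' objective.

-- ===== PORT A =====
def genere_cles (campagne : List (String × Int)) (rend_inutile : List (String × List String)) : List String :=
  -- liste = list(campagne.keys())
  let liste := (PySem.Dict.ofList campagne).keys
  -- note = {cle: 0 for cle in liste}
  let note0 : PySem.Dict String Int := liste.foldl (fun d cle => d.insert cle 0) PySem.Dict.empty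
  -- for cle in campagne.keys(): for cles_simples in rend_inutile.values(): if cle in cles_simples: note[cle] += 1
  let note := liste.foldl
    (fun d cle => ((PySem.Dict.ofList rend_inutile).values).foldl
      (fun d cles_simples => if cle ∈ cles_simples then d.modify cle 0 (· + 1) else d) d) note0
  -- liste.sort(key=lambda x: note[x])  (every x in liste is a key of note, so getD 0 = note[x])
  PySem.List.sorted liste (fun x => note.getD x 0) false

-- ===== PORT B =====
def genere_cles_alt (campagne : List (String × Int)) (rend_inutile : List (String × List String)) : List String :=
  -- vals = list(rend_inutile.values())
  let vals := (PySem.Dict.ofList rend_inutile).values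
  -- note = {cle: sum(cle in cs for cs in vals) for cle in campagne}
  -- (a sum of booleans is a nonnegative count: value-exact as Nat, = List.countP)
  let note : PySem.Dict String Nat :=
    PySem.Dict.ofList (((PySem.Dict.ofList campagne).keys).map
      (fun cle => (cle, vals.countP (fun cs => cle ∈ cs))))
  -- buckets = [[] for _ in range(max(note.values(), default=0) + 1)]
  let buckets0 : List (List String) :=
    (List.range (PySem.List.maxD note.values (fun v => v) 0 + 1)).map (fun _ => ([] : List String))
  -- for cle in campagne: buckets[note[cle]].append(cle)   (note[cle] < len(buckets), proved below)
  let buckets := ((PySem.Dict.ofList campagne).keys).foldl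
    (fun bs cle => bs.modify (note.getD cle 0) (· ++ [cle])) buckets0
  -- return [cle for b in buckets for cle in b]
  buckets.flatten

-- ===== PRECONDITION & SPEC =====
def Spec_genere_cles (campagne : List (String × Int)) (rend_inutile : List (String × List String)) (out : List String) : Prop := out = genere_cles_alt campagne rend_inutile
instance (campagne : List (String × Int)) (rend_inutile : List (String × List String)) (out : List String) : Decidable (Spec_genere_cles campagne rend_inutile out) := by unfold Spec_genere_cles; infer_instance

-- ===== CLAIM (what is proved, stated in full; the proofs are below) =====
def Claim_equal_genere_cles : Prop := ∀ (campagne : List (String × Int)) (rend_inutile : List (String × List String)), Dom_genere_cles campagne rend_inutile → Spec_genere_cles campagne rend_inutile (genere_cles campagne rend_inutile)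

-- ===== LEMMAS AND PROOFS =====

-- the count both programs compute for a key
def pvCnt (rend_inutile : List (String × List String)) (cle : String) : Nat :=
  ((PySem.Dict.ofList rend_inutile).values).countP (fun cs => cle ∈ cs)

-- A's init dict maps everything to 0 (under getD 0)
lemma getD_initZero (ks : List String) (d : PySem.Dict String Int) (x : String)
    (h : d.getD x 0 = 0) :
    (ks.foldl (fun d cle => d.insert cle 0) d).getD x 0 = 0 := by
  induction ks generalizing d with
  | nil => simpa using h
  | cons c ks ih =>
      simp only [List.foldl_cons]
      exact ih _ (by rw [PySem.Dict.getD_insert]; split <;> simp [h])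

-- A's inner loop adds the membership count to the key it is counting
lemma getD_innerLoop (vals : List (List String)) (cle x : String) (d : PySem.Dict String Int) :
    (vals.foldl (fun d cs => if cle ∈ cs then d.modify cle 0 (· + 1) else d) d).getD x 0
      = d.getD x 0 + if x = cle then (vals.countP (fun cs => cle ∈ cs) : Int) else 0 := by
  induction vals generalizing d with
  | nil => simp
  | cons cs vals ih =>
      simp only [List.foldl_cons, List.countP_cons]
      rw [ih]
      by_cases hc : cle ∈ cs
      · simp only [if_pos hc, PySem.Dict.getD_modify]
        by_cases hx : x = cle
        · subst hx; simp only [hc, decide_true, if_pos]; push_cast; ring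
        · simp [hx]
      · by_cases hx : x = cle <;> simp [hc, hx]

-- A's outer loop: final count of x is (count of x in ks) * its membership count
lemma getD_outerLoop (rend_inutile : List (String × List String)) (ks : List String)
    (d : PySem.Dict String Int) (x : String) :
    (ks.foldl (fun d cle => ((PySem.Dict.ofList rend_inutile).values).foldl
        (fun d cs => if cle ∈ cs then d.modify cle 0 (· + 1) else d) d) d).getD x 0
      = d.getD x 0 + (ks.count x : Int) * (pvCnt rend_inutile x : Int) := by
  induction ks generalizing d with
  | nil => simp
  | cons c ks ih =>
      simp only [List.foldl_cons]
      rw [ih, getD_innerLoop]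
      rw [List.count_cons]
      by_cases hx : x = c
      · subst hx; simp [pvCnt]; ring
      · simp [hx, Ne.symm hx]

-- bucket fold: the fold keeps the number of buckets
lemma bucketFold_length (ks : List String) (idx : String → Nat) (bs : List (List String)) :
    (ks.foldl (fun bs x => bs.modify (idx x) (· ++ [x])) bs).length = bs.length := by
  induction ks generalizing bs with
  | nil => rfl
  | cons c ks ih => simp [ih]

-- bucket fold: bucket j collects, in order, the keys whose index is j
lemma bucketFold_getElem (ks : List String) (idx : String → Nat) (bs : List (List String))
    (j : Nat) (hj : j < bs.length) :
    (ks.foldl (fun bs x => bs.modify (idx x) (· ++ [x])) bs)[j]'(by rw [bucketFold_length]; exact hj)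
      = bs[j] ++ ks.filter (fun x => idx x = j) := by
  induction ks generalizing bs with
  | nil => simp
  | cons c ks ih =>
      simp only [List.foldl_cons]
      rw [ih (bs.modify (idx c) (· ++ [c])) (by simpa using hj)]
      rw [List.getElem_modify, List.filter_cons]
      by_cases h : idx c = j
      · simp [h, List.append_assoc]
      · simp [h]

-- insertBy passes over a prefix it does not go before
lemma insertBy_append (before : String → String → Bool) (x : String) (pre suf : List String)
    (h : ∀ y ∈ pre, before x y = false) :
    PySem.List.insertBy before x (pre ++ suf) = pre ++ PySem.List.insertBy before x suf := by
  induction pre with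
  | nil => simp
  | cons y pre ih =>
      have hy : before x y = false := h y (by simp)
      have hstep : PySem.List.insertBy before x (y :: (pre ++ suf))
          = y :: PySem.List.insertBy before x (pre ++ suf) := by
        simp [PySem.List.insertBy, hy]
      simp only [List.cons_append]
      rw [hstep, ih (fun z hz => h z (by simp [hz]))]

lemma insertBy_all_before (before : String → String → Bool) (x : String) (l : List String)
    (h : ∀ y ∈ l, before x y = true) :
    PySem.List.insertBy before x l = x :: l := by
  cases l with
  | nil => rfl
  | cons y t => simp [PySem.List.insertBy, h y (by simp)]

-- STABLE BUCKET SORT: a stable sort by key is the concatenation of the key-buckets,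
-- taken along any strictly increasing list of key values covering the list
lemma sorted_eq_flatMap_filter (key : String → Int) (ks : List Int)
    (hks : ks.Pairwise (· < ·)) (xs : List String) (hmem : ∀ x ∈ xs, key x ∈ ks) :
    PySem.List.sorted xs key false = ks.flatMap (fun j => xs.filter (fun x => key x = j)) := by
  induction xs using List.reverseRecOn with
  | nil => simp [PySem.List.sorted_eq_foldl_insertBy]
  | append_singleton xs x ih =>
      have hx : key x ∈ ks := hmem x (by simp)
      obtain ⟨ks1, ks2, hsplit⟩ := List.append_of_mem hx
      have hks' := hks; rw [hsplit, List.pairwise_append] at hks'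
      obtain ⟨h1, h2, h12⟩ := hks'
      have h2' : ∀ j ∈ ks2, key x < j := fun j hj => (List.pairwise_cons.mp h2).1 j hj
      have h1' : ∀ j ∈ ks1, j < key x := fun j hj => h12 j hj (key x) (by simp)
      have hsor : PySem.List.sorted (xs ++ [x]) key false
          = PySem.List.insertBy (fun a b => decide (key a < key b)) x (PySem.List.sorted xs key false) := by
        rw [PySem.List.sorted_eq_foldl_insertBy, PySem.List.sorted_eq_foldl_insertBy, List.foldl_append]
        rfl
      rw [hsor, ih (fun y hy => hmem y (by simp [hy]))]
      -- split the buckets at key x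
      rw [hsplit]
      simp only [List.flatMap_append, List.flatMap_cons]
      rw [← List.append_assoc]
      rw [insertBy_append _ _ _ _ (by
        intro y hy
        simp only [List.mem_append, List.mem_flatMap, List.mem_filter] at hy
        simp only [decide_eq_false_iff_not, not_lt]
        rcases hy with ⟨j, hj, _, hkey⟩ | ⟨_, hkey⟩
        · have he : key y = j := by simpa using hkey
          have := h1' j hj; omega
        · have he : key y = key x := by simpa using hkey
          omega)]
      rw [insertBy_all_before _ _ _ (by
        intro y hy
        simp only [List.mem_flatMap, List.mem_filter] at hy
        obtain ⟨j, hj, _, hkey⟩ := hy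
        have he : key y = j := by simpa using hkey
        have := h2' j hj
        simp only [decide_eq_true_iff]; omega)]
      -- now match the filters of xs ++ [x]
      have hf : ∀ j : Int, (xs ++ [x]).filter (fun y => key y = j)
          = xs.filter (fun y => key y = j) ++ if key x = j then [x] else [] := by
        intro j; rw [List.filter_append]; simp [List.filter]; split <;> simp_all
      have hne1 : ∀ j ∈ ks1, (xs ++ [x]).filter (fun y => key y = j) = xs.filter (fun y => key y = j) := by
        intro j hj; rw [hf]; simp [(ne_of_gt (h1' j hj))]
      have hne2 : ∀ j ∈ ks2, (xs ++ [x]).filter (fun y => key y = j) = xs.filter (fun y => key y = j) := by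
        intro j hj; rw [hf]; simp [(ne_of_lt (h2' j hj))]
      rw [List.flatMap_congr hne1, List.flatMap_congr hne2, hf (key x)]
      simp [List.append_assoc]

-- named pieces of the two ports (proof helpers)
def pvListe (campagne : List (String × Int)) : List String := (PySem.Dict.ofList campagne).keys

def pvNoteA (campagne : List (String × Int)) (rend_inutile : List (String × List String)) : PySem.Dict String Int :=
  (pvListe campagne).foldl
    (fun d cle => ((PySem.Dict.ofList rend_inutile).values).foldl
      (fun d cles_simples => if cle ∈ cles_simples then d.modify cle 0 (· + 1) else d) d)
    ((pvListe campagne).foldl (fun d cle => d.insert cle 0) PySem.Dict.empty)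

def pvNoteB (campagne : List (String × Int)) (rend_inutile : List (String × List String)) : PySem.Dict String Nat :=
  PySem.Dict.ofList ((pvListe campagne).map (fun cle => (cle, pvCnt rend_inutile cle)))

def pvM (campagne : List (String × Int)) (rend_inutile : List (String × List String)) : Nat :=
  PySem.List.maxD (pvNoteB campagne rend_inutile).values (fun v => v) 0

lemma noteB_items (campagne : List (String × Int)) (rend_inutile : List (String × List String)) :
    (pvNoteB campagne rend_inutile).items = (pvListe campagne).map (fun cle => (cle, pvCnt rend_inutile cle)) := by
  rw [show pvNoteB campagne rend_inutile
      = ((pvListe campagne).map (fun cle => (cle, pvCnt rend_inutile cle))).foldl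
          (fun acc p => acc.insert p.1 p.2) PySem.Dict.empty from rfl,
      List.foldl_map]
  rw [PySem.Dict.items_foldl_insert_fresh (pvListe campagne) (fun cle => cle)
      (fun cle => pvCnt rend_inutile cle) PySem.Dict.empty
      (fun a _ => PySem.Dict.contains_empty a)
      (by simp only [List.map_id']; exact PySem.Dict.nodup_keys_ofList campagne)]
  simp [show (PySem.Dict.empty : PySem.Dict String Nat).items = [] from rfl]

lemma noteB_getD (campagne : List (String × Int)) (rend_inutile : List (String × List String))
    (x : String) (hx : x ∈ pvListe campagne) :
    (pvNoteB campagne rend_inutile).getD x 0 = pvCnt rend_inutile x := by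
  have hmem : (x, pvCnt rend_inutile x) ∈ (pvNoteB campagne rend_inutile).items := by
    rw [noteB_items]; exact List.mem_map_of_mem hx
  exact PySem.Dict.getD_of_mem_items _ hmem
    (by unfold pvNoteB; exact PySem.Dict.nodup_keys_ofList _) 0

lemma noteB_values (campagne : List (String × Int)) (rend_inutile : List (String × List String)) :
    (pvNoteB campagne rend_inutile).values = (pvListe campagne).map (pvCnt rend_inutile) := by
  show ((pvNoteB campagne rend_inutile).items).map (·.2) = _
  rw [noteB_items, List.map_map]
  rfl

lemma cnt_le_M (campagne : List (String × Int)) (rend_inutile : List (String × List String))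
    (x : String) (hx : x ∈ pvListe campagne) :
    pvCnt rend_inutile x ≤ pvM campagne rend_inutile := by
  unfold pvM PySem.List.maxD
  cases hm : PySem.List.max? (pvNoteB campagne rend_inutile).values (fun v => v) with
  | none =>
      rw [PySem.List.max?_eq_none_iff, noteB_values] at hm
      simp only [List.map_eq_nil_iff] at hm
      rw [hm] at hx; cases hx
  | some m =>
      have := PySem.List.max?_isMax hm (pvCnt rend_inutile x)
        (by rw [noteB_values]; exact List.mem_map_of_mem hx)
      simpa using this

lemma keyA_eq (campagne : List (String × Int)) (rend_inutile : List (String × List String))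
    (x : String) (hx : x ∈ pvListe campagne) :
    (pvNoteA campagne rend_inutile).getD x 0 = (pvCnt rend_inutile x : Int) := by
  unfold pvNoteA
  rw [getD_outerLoop]
  rw [getD_initZero _ _ _ (PySem.Dict.getD_empty x 0)]
  have hnd : (pvListe campagne).Nodup := PySem.Dict.nodup_keys_ofList campagne
  rw [List.count_eq_one_of_mem hnd hx]
  simp

lemma A_eq (campagne : List (String × Int)) (rend_inutile : List (String × List String)) :
    genere_cles campagne rend_inutile
      = (List.range (pvM campagne rend_inutile + 1)).flatMap
          (fun j => (pvListe campagne).filter (fun x => pvCnt rend_inutile x = j)) := by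
  show PySem.List.sorted (pvListe campagne)
      (fun x => (pvNoteA campagne rend_inutile).getD x 0) false = _
  rw [sorted_eq_flatMap_filter _
      (List.map (fun n : Nat => (n : Int)) (List.range (pvM campagne rend_inutile + 1)))
      (by
        refine List.Pairwise.map (fun n : Nat => (n : Int)) (fun a b h => ?_) List.pairwise_lt_range
        simpa using h)
      _ (by
        intro x hx
        refine List.mem_map.mpr ⟨pvCnt rend_inutile x,
          List.mem_range.mpr (Nat.lt_succ_of_le (cnt_le_M campagne rend_inutile x hx)),
          (keyA_eq campagne rend_inutile x hx).symm⟩)]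
  rw [List.flatMap_map]
  refine List.flatMap_congr (fun n _ => ?_)
  refine List.filter_congr (fun x hx => ?_)
  rw [keyA_eq campagne rend_inutile x hx]
  simp

lemma B_eq (campagne : List (String × Int)) (rend_inutile : List (String × List String)) :
    genere_cles_alt campagne rend_inutile
      = (List.range (pvM campagne rend_inutile + 1)).flatMap
          (fun j => (pvListe campagne).filter (fun x => pvCnt rend_inutile x = j)) := by
  show ((pvListe campagne).foldl
      (fun bs cle => bs.modify ((pvNoteB campagne rend_inutile).getD cle 0) (· ++ [cle]))
      ((List.range (pvM campagne rend_inutile + 1)).map (fun _ => ([] : List String)))).flatten = _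
  have hbs : ((pvListe campagne).foldl
      (fun bs cle => bs.modify ((pvNoteB campagne rend_inutile).getD cle 0) (· ++ [cle]))
      ((List.range (pvM campagne rend_inutile + 1)).map (fun _ => ([] : List String))))
      = (List.range (pvM campagne rend_inutile + 1)).map
          (fun j => (pvListe campagne).filter (fun x => pvCnt rend_inutile x = j)) := by
    apply List.ext_getElem
    · rw [bucketFold_length]; simp
    · intro j h1 h2
      rw [bucketFold_getElem _ _ _ j (by simpa using h2)]
      simp only [List.getElem_map, List.getElem_range, List.nil_append]
      refine List.filter_congr (fun x hx => ?_)
      rw [noteB_getD campagne rend_inutile x hx]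
  rw [hbs]
  simp [List.flatMap_def]

theorem genere_cles_spec : Claim_equal_genere_cles := by
  intro campagne rend_inutile _
  show genere_cles campagne rend_inutile = genere_cles_alt campagne rend_inutile
  rw [A_eq, B_eq]
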